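-- pv_equiv track=rewrite | github.com/molinaangeldavid/parciales | parcial3.py | mejor_tratamiento
-- ===== SOURCE A (Python) =====
-- def mejor_tratamiento(diccionario,diccionario_nuevo)->None:
--     lista_viejos = [] #cantidad de tratamientos
--     lista_nuevo = []
--     for values in diccionario.values():
--         lista_viejos.append(values)
--     for values2 in diccionario_nuevo.values():
--         lista_nuevo.append(values2)
--     maximo = max(lista_viejos)
--     posicion = lista_viejos.count(maximo)
--     posicion += 1
--     maximo2 = max(lista_nuevo)
--     posicion2 = lista_nuevo.count(maximo2)
--     posicion2 += 1
--     return [posicion,maximo],[posicion2,maximo2]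
-- ===== SOURCE B (Python) =====
-- def _max_run(values):
--     mx = None
--     cnt = 0
--     for v in values:
--         if mx is None or v > mx:
--             mx = v
--             cnt = 1
--         elif v == mx:
--             cnt += 1
--     if mx is None:
--         raise ValueError("empty dict")
--     return [cnt + 1, mx]
--
-- def mejor_tratamiento(diccionario, diccionario_nuevo):
--     return _max_run(diccionario.values()), _max_run(diccionario_nuevo.values())
-- ===== Notes on version B (the rewrite author's own statement) =====
-- stated objective: simpler
-- what changed: Replaces A's three passes per dict (copy values into a list, max(), count()) by a single pass over the values carrying the running maximum and its multiplicity.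
import Mathlib
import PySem

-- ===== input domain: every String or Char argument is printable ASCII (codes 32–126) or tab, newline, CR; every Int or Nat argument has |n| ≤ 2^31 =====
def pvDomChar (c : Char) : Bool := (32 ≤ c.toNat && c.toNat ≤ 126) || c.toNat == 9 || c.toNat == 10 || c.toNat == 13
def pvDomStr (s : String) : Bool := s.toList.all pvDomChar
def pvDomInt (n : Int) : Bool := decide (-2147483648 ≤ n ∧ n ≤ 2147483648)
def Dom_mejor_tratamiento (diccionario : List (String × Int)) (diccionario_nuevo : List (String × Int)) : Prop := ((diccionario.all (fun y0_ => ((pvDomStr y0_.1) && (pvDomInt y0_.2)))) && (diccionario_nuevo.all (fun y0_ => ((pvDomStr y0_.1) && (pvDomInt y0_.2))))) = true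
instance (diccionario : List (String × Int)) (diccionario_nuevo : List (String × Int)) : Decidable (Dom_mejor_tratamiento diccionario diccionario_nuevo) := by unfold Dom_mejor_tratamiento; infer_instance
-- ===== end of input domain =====

-- B replaces A's build-list / max() / count() triple pass per dict by a single pass that
-- maintains the running maximum and its multiplicity (objective: simpler one-pass decomposition).


-- ===== PORT A =====
-- lista_viejos / lista_nuevo = the dicts' values appended one by one; max() -> PySem.List.max?
-- (none = ValueError on an empty dict, excluded by Pre_; getD 0 is never read inside Pre_).
def mejor_tratamiento (diccionario : List (String × Int)) (diccionario_nuevo : List (String × Int)) : List Int × List Int :=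
  let lista_viejos : List Int := (PySem.Dict.ofList diccionario).values
  let lista_nuevo : List Int := (PySem.Dict.ofList diccionario_nuevo).values
  let maximo : Int := (PySem.List.max? lista_viejos (fun x => x)).getD 0
  let posicion : Int := (PySem.List.count lista_viejos maximo : Int) + 1
  let maximo2 : Int := (PySem.List.max? lista_nuevo (fun x => x)).getD 0
  let posicion2 : Int := (PySem.List.count lista_nuevo maximo2 : Int) + 1
  ([posicion, maximo], [posicion2, maximo2])

-- ===== PORT B =====
-- one pass: carry (current max, its multiplicity) as an Option; none = no element seen yet
def pvStep (acc : Option (Int × Int)) (v : Int) : Option (Int × Int) :=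
  match acc with
  | none => some (v, 1)
  | some (m, c) => if v > m then some (v, 1) else if v == m then some (m, c + 1) else some (m, c)

-- Python's _max_run raises ValueError on an empty sequence (excluded by Pre_); [] marks that branch
def pvMaxRun (values : List Int) : List Int :=
  match values.foldl pvStep none with
  | none => []
  | some (m, c) => [c + 1, m]

def mejor_tratamiento_alt (diccionario : List (String × Int)) (diccionario_nuevo : List (String × Int)) : List Int × List Int :=
  (pvMaxRun (PySem.Dict.ofList diccionario).values, pvMaxRun (PySem.Dict.ofList diccionario_nuevo).values)

-- ===== PRECONDITION & SPEC =====
-- Pre_ excludes empty dicts, on which A's max([]) raises ValueError (and B raises too).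
def Pre_mejor_tratamiento (diccionario : List (String × Int)) (diccionario_nuevo : List (String × Int)) : Prop :=
  diccionario ≠ [] ∧ diccionario_nuevo ≠ []
instance (diccionario : List (String × Int)) (diccionario_nuevo : List (String × Int)) : Decidable (Pre_mejor_tratamiento diccionario diccionario_nuevo) := by unfold Pre_mejor_tratamiento; infer_instance

def pvWitness_mejor_tratamiento : (List (String × Int)) × (List (String × Int)) :=
  ([("a", 3), ("b", 3), ("c", 1)], [("x", 5)])

def Spec_mejor_tratamiento (diccionario : List (String × Int)) (diccionario_nuevo : List (String × Int)) (out : List Int × List Int) : Prop := out = mejor_tratamiento_alt diccionario diccionario_nuevo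
instance (diccionario : List (String × Int)) (diccionario_nuevo : List (String × Int)) (out : List Int × List Int) : Decidable (Spec_mejor_tratamiento diccionario diccionario_nuevo out) := by unfold Spec_mejor_tratamiento; infer_instance

-- ===== CLAIM (what is proved, stated in full; the proofs are below) =====
def Claim_equal_mejor_tratamiento : Prop := ∀ (diccionario : List (String × Int)) (diccionario_nuevo : List (String × Int)), Dom_mejor_tratamiento diccionario diccionario_nuevo → Pre_mejor_tratamiento diccionario diccionario_nuevo → Spec_mejor_tratamiento diccionario diccionario_nuevo (mejor_tratamiento diccionario diccionario_nuevo)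

-- ===== LEMMAS AND PROOFS =====

-- inserting into any dict leaves a nonempty item list
theorem pv_insert_items_ne_nil {κ ν : Type} [BEq κ] (d : PySem.Dict κ ν) (k : κ) (v : ν) :
    (d.insert k v).items ≠ [] := by
  rw [PySem.Dict.items_insert]
  split_ifs with h
  · intro hmap
    rcases List.map_eq_nil_iff.mp hmap with hnil
    simp [PySem.Dict.contains, hnil] at h
  · simp

theorem pv_update_items_ne_nil {κ ν : Type} [BEq κ] (ps : List (κ × ν)) (d : PySem.Dict κ ν)
    (h : d.items ≠ []) : (d.update ps).items ≠ [] := by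
  induction ps generalizing d with
  | nil => simpa [PySem.Dict.update] using h
  | cons p ps ih =>
    have := ih (d.insert p.1 p.2) (pv_insert_items_ne_nil d p.1 p.2)
    simpa [PySem.Dict.update, List.foldl_cons] using this

theorem pv_ofList_values_ne_nil {κ ν : Type} [BEq κ] (l : List (κ × ν)) (h : l ≠ []) :
    (PySem.Dict.ofList l).values ≠ [] := by
  cases l with
  | nil => exact absurd rfl h
  | cons p ps =>
    have hit : (PySem.Dict.ofList (p :: ps)).items ≠ [] := by
      have := pv_update_items_ne_nil ps (PySem.Dict.empty.insert p.1 p.2)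
        (pv_insert_items_ne_nil _ p.1 p.2)
      simpa [PySem.Dict.ofList, PySem.Dict.update, List.foldl_cons] using this
    simpa [PySem.Dict.values, List.map_eq_nil_iff] using hit

-- max? on Int with identity key is the running foldl max
theorem pv_max?_cons (y : Int) (ys : List Int) :
    PySem.List.max? (y :: ys) (fun x => x) = some (List.foldl max y ys) := by
  induction ys generalizing y with
  | nil => rfl
  | cons z ys ih =>
    have h1 : PySem.List.max? (y :: z :: ys) (fun x => x)
        = PySem.List.max? (max y z :: ys) (fun x => x) := by
      simp only [PySem.List.max?, List.foldl_cons]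
      by_cases h : y < z
      · simp [h, max_eq_right (le_of_lt h)]
      · simp [h, max_eq_left (le_of_not_gt h)]
    rw [h1, ih, List.foldl_cons]

-- invariant for B's single pass
theorem pv_step_invariant (xs : List Int) (m c : Int) :
    List.foldl pvStep (some (m, c)) xs
      = some (List.foldl max m xs,
          (List.count (List.foldl max m xs) xs : Int)
            + (if List.foldl max m xs = m then c else 0)) := by
  induction xs generalizing m c with
  | nil => simp
  | cons v xs ih =>
    simp only [List.foldl_cons]
    by_cases hvm : v > m
    · have hmax : max m v = v := max_eq_right (le_of_lt hvm)
      have hM := (PySem.List.le_foldl_max xs v).1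
      rw [show pvStep (some (m, c)) v = some (v, 1) by simp [pvStep, hvm]]
      refine (ih v 1).trans ?_
      have hne : List.foldl max v xs ≠ m := by omega
      simp [hmax, List.count_cons, hne]
      split_ifs with h1 h2 h2 <;> omega
    · have hmax : max m v = m := max_eq_left (le_of_not_gt hvm)
      have hM := (PySem.List.le_foldl_max xs m).1
      by_cases hvm2 : v = m
      · rw [show pvStep (some (m, c)) v = some (m, c + 1) by simp [pvStep, hvm2]]
        refine (ih m (c + 1)).trans ?_
        subst hvm2
        simp [List.count_cons]
        split_ifs with h1 h2 h2 <;> omega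
      · rw [show pvStep (some (m, c)) v = some (m, c) by simp [pvStep, hvm, hvm2]]
        refine (ih m c).trans ?_
        have hne : v ≠ List.foldl max m xs := by omega
        simp [hmax, hne]

-- per-list agreement on a nonempty list
theorem pv_maxrun_eq (xs : List Int) (h : xs ≠ []) :
    ([(PySem.List.count xs ((PySem.List.max? xs (fun x => x)).getD 0) : Int) + 1,
      (PySem.List.max? xs (fun x => x)).getD 0] : List Int) = pvMaxRun xs := by
  cases xs with
  | nil => exact absurd rfl h
  | cons y ys =>
    rw [pv_max?_cons]
    unfold pvMaxRun
    rw [List.foldl_cons, show pvStep none y = some (y, 1) from rfl, pv_step_invariant ys y 1]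
    simp only [Option.getD_some, PySem.List.count, List.count_cons, List.cons.injEq, and_true]
    push_cast
    by_cases hF : List.foldl max y ys = y
    · simp [hF]
    · have h2 : ¬ y = List.foldl max y ys := fun hh => hF hh.symm
      simp [hF, h2]

-- ===== VERDICT (by name: the statement is the Claim_ definition above) =====
theorem mejor_tratamiento_spec : Claim_equal_mejor_tratamiento := by
  intro d dn _ hpre
  unfold Spec_mejor_tratamiento mejor_tratamiento mejor_tratamiento_alt
  rw [← pv_maxrun_eq _ (pv_ofList_values_ne_nil d hpre.1),
      ← pv_maxrun_eq _ (pv_ofList_values_ne_nil dn hpre.2)]
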